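-- pv_equiv track=rewrite | github.com/edenuis/Python | Code Challenges/canModifyNonDecreasing.py | canModify
-- ===== SOURCE A (Python) =====
-- def canModify(numbers):
--     curr_idx = -1
--     for idx in range(1, len(numbers)):
--         if numbers[idx] < numbers[idx-1]:
--             if curr_idx is not -1:
--                 return False
--             curr_idx = idx
--     return curr_idx == -1 or curr_idx == 1 or curr_idx == len(numbers) - 1 or numbers[curr_idx-1] <= numbers[curr_idx+1] or numbers[curr_idx-2] <= numbers[curr_idx]
-- ===== SOURCE B (Python) =====
-- def canModify(numbers):
--     if not numbers:
--         return True
--     prevprev = None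
--     prev = numbers[0]
--     violations = 0
--     for x in numbers[1:]:
--         if x < prev:
--             violations += 1
--             if violations > 1:
--                 return False
--             if prevprev is not None and prevprev > x:
--                 x = prev  # cannot lower prev: conceptually raise x up to prev
--             prevprev, prev = prev, x
--         else:
--             prevprev, prev = prev, x
--     return True
-- ===== Notes on version B (the rewrite author's own statement) =====
-- stated objective: idiomatic
-- what changed: A records the index of the single raw descent and afterwards re-indexes into the list for a feasibility post-check; B is a single index-free greedy pass keeping (prevprev, prev) and a violation counter, deciding the lower-vs-raise fix inline at the first violation.
import Mathlib
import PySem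

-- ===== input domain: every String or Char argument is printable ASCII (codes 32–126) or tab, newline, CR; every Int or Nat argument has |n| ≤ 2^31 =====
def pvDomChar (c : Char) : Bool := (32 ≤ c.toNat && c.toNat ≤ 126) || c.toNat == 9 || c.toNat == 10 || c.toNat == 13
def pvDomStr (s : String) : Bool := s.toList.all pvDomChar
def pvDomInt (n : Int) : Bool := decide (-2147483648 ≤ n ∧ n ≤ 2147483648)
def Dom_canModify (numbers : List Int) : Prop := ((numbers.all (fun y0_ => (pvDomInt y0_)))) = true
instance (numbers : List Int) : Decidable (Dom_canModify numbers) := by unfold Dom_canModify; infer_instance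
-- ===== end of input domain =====

-- B replaces A's descent-index search + index-based feasibility post-check by a single index-free
-- greedy pass keeping (prevprev, prev) and a violation counter (objective: idiomatic/alternative).

-- ===== PORT A =====
-- Loop body of A: the early `return False` is modelled by the dead state `none`.
def stepA (numbers : List Int) (st : Option Int) (idx : Int) : Option Int :=
  match st with
  | none => none
  | some c =>
    if PySem.List.pyGetD numbers idx 0 < PySem.List.pyGetD numbers (idx - 1) 0 then
      if c ≠ -1 then none else some idx
    else some c

-- A's final return expression. Every index Python evaluates here is in range (c ∈ [1,n-1];
-- numbers[c-2] with c=1 is Python's in-range wrap to numbers[-1], which pyGetD also performs,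
-- and that disjunct is anyway preceded by the true disjunct c==1); numbers[c+1] with c=n-1 is
-- short-circuited in Python and its pyGetD default cannot change the already-true disjunction.
def finalA (numbers : List Int) (n c : Int) : Bool :=
  decide (c = -1) || decide (c = 1) || decide (c = n - 1) ||
  decide (PySem.List.pyGetD numbers (c - 1) 0 ≤ PySem.List.pyGetD numbers (c + 1) 0) ||
  decide (PySem.List.pyGetD numbers (c - 2) 0 ≤ PySem.List.pyGetD numbers c 0)

def canModify (numbers : List Int) : Bool :=
  match (PySem.List.pyRange 1 (numbers.length : Int) 1).foldl (stepA numbers) (some (-1)) with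
  | none => false
  | some c => finalA numbers (numbers.length : Int) c

-- ===== PORT B =====
def altLoop (prevprev : Option Int) (prev : Int) (violations : Nat) : List Int → Bool
  | [] => true
  | x :: rest =>
    if x < prev then
      if violations + 1 > 1 then false
      else
        match prevprev with
        | some q => if q > x then altLoop (some prev) prev 1 rest
                    else altLoop (some prev) x 1 rest
        | none => altLoop (some prev) x 1 rest
    else altLoop (some prev) x violations rest

def canModify_alt : List Int → Bool
  | [] => true
  | a :: rest => altLoop none a 0 rest

-- ===== PRECONDITION & SPEC =====
def Spec_canModify (numbers : List Int) (out : Bool) : Prop := out = canModify_alt numbers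
instance (numbers : List Int) (out : Bool) : Decidable (Spec_canModify numbers out) := by unfold Spec_canModify; infer_instance

-- ===== CLAIM (what is proved, stated in full; the proofs are below) =====
def Claim_equal_canModify : Prop := ∀ (numbers : List Int), Dom_canModify numbers → Spec_canModify numbers (canModify numbers)

-- ===== LEMMAS AND PROOFS =====

-- "rest is non-decreasing starting from prev"
def chainB (p : Int) : List Int → Bool
  | [] => true
  | y :: r => decide (p ≤ y) && chainB y r

theorem foldl_stepA_none (numbers l : List Int) :
    l.foldl (stepA numbers) none = none := by
  induction l with
  | nil => rfl
  | cons x r ih => simpa [stepA] using ih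

theorem altLoop_one (rest : List Int) : ∀ (pp : Option Int) (p : Int),
    altLoop pp p 1 rest = chainB p rest := by
  induction rest with
  | nil => intro pp p; rfl
  | cons x r ih =>
    intro pp p
    by_cases h : x < p
    · simp [altLoop, chainB, h, not_le.mpr h]
    · simp [altLoop, chainB, h, not_lt.mp h, ih]

theorem getD_shift (pre ys : List Int) (k : Nat) :
    PySem.List.pyGetD (pre ++ ys) (((pre.length + k : Nat) : Int)) 0 = ys.getD k 0 := by
  rw [PySem.List.pyGetD_natCast]
  simp [List.getD, List.getElem?_append_right]

theorem phase2 (numbers : List Int) : ∀ (rest pre : List Int) (p c : Int),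
    numbers = pre ++ p :: rest → c ≠ -1 →
    (PySem.List.pyRange ((pre.length : Int) + 1) (numbers.length : Int) 1).foldl
        (stepA numbers) (some c)
      = if chainB p rest then some c else none := by
  intro rest
  induction rest with
  | nil =>
    intro pre p c hnum hc
    rw [PySem.List.pyRange_one_eq_nil (by simp only [hnum, List.length_append, List.length_cons, List.length_nil]; push_cast; omega)]
    simp [chainB]
  | cons x r ih =>
    intro pre p c hnum hc
    have hx : PySem.List.pyGetD numbers ((pre.length : Int) + 1) 0 = x := by
      have := getD_shift pre (p :: x :: r) 1
      rw [hnum]; simpa using this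
    have hp : PySem.List.pyGetD numbers ((pre.length : Int) + 1 - 1) 0 = p := by
      have := getD_shift pre (p :: x :: r) 0
      rw [hnum]; simpa using this
    rw [PySem.List.pyRange_one_cons (by simp only [hnum, List.length_append, List.length_cons, List.length_nil]; push_cast; omega)]
    simp only [List.foldl_cons]
    by_cases h : x < p
    · rw [show stepA numbers (some c) ((pre.length : Int) + 1) = none by
        simp only [stepA]; rw [hx, hp]; simp [h, hc]]
      simp [foldl_stepA_none, chainB, not_le.mpr h]
    · rw [show stepA numbers (some c) ((pre.length : Int) + 1) = some c by
        simp only [stepA]; rw [hx, hp]; simp [h]]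
      have := ih (pre ++ [p]) x c (by simp [hnum]) hc
      rw [show (((pre ++ [p]).length : Int) + 1) = ((pre.length : Int) + 1 + 1) by
        simp [List.length_append]] at this
      rw [this]
      simp [chainB, not_lt.mp h]

theorem phase1 (numbers : List Int) : ∀ (rest pre : List Int) (p : Int),
    numbers = pre ++ p :: rest →
    (match (PySem.List.pyRange ((pre.length : Int) + 1) (numbers.length : Int) 1).foldl
        (stepA numbers) (some (-1)) with
      | none => false
      | some c => finalA numbers (numbers.length : Int) c)
      = altLoop pre.getLast? p 0 rest := by
  intro rest
  induction rest with
  | nil =>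
    intro pre p hnum
    rw [PySem.List.pyRange_one_eq_nil (by simp only [hnum, List.length_append, List.length_cons, List.length_nil]; push_cast; omega)]
    simp [altLoop, finalA]
  | cons x r ih =>
    intro pre p hnum
    have hx : PySem.List.pyGetD numbers ((pre.length : Int) + 1) 0 = x := by
      have := getD_shift pre (p :: x :: r) 1
      rw [hnum]; simpa using this
    have hp : PySem.List.pyGetD numbers ((pre.length : Int) + 1 - 1) 0 = p := by
      have := getD_shift pre (p :: x :: r) 0
      rw [hnum]; simpa using this
    rw [PySem.List.pyRange_one_cons (by simp only [hnum, List.length_append, List.length_cons, List.length_nil]; push_cast; omega)]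
    simp only [List.foldl_cons]
    by_cases h : x < p
    · -- first descent found at index pre.length + 1
      rw [show stepA numbers (some (-1 : Int)) ((pre.length : Int) + 1) = some ((pre.length : Int) + 1) by
        simp only [stepA]; rw [hx, hp]; simp [h]]
      have h2 := phase2 numbers r (pre ++ [p]) x ((pre.length : Int) + 1)
        (by simp [hnum]) (by omega)
      rw [show (((pre ++ [p]).length : Int) + 1) = ((pre.length : Int) + 1 + 1) by
        simp [List.length_append]] at h2
      rw [h2]
      rw [show (match (if chainB x r then some ((pre.length : Int) + 1) else none : Option Int) with
            | none => false
            | some c => finalA numbers ((numbers.length : Int)) c)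
          = (chainB x r && finalA numbers ((numbers.length : Int)) ((pre.length : Int) + 1)) by
        cases chainB x r <;> simp]
      have hcp : PySem.List.pyGetD numbers ((pre.length : Int) + 1 - 1) 0 = p := hp
      rcases hlast : pre.getLast? with _ | q
      · -- pre = []: curr_idx == 1, A's check is trivially true; B lowers prev to x
        have hpre : pre = [] := List.getLast?_eq_none_iff.mp hlast
        subst hpre
        simp [finalA, altLoop, h, altLoop_one]
      · -- pre = pre0 ++ [q]: q = numbers[curr_idx - 2]
        obtain ⟨pre0, rfl⟩ : ∃ pre0, pre = pre0 ++ [q] := by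
          rcases List.eq_nil_or_concat pre with rfl | ⟨l, b, rfl⟩
          · simp at hlast
          · exact ⟨l, by simpa using (by simpa [List.getLast?_concat] using hlast : b = q) ▸ rfl⟩
        have hq : PySem.List.pyGetD numbers (((pre0 ++ [q]).length : Int) + 1 - 2) 0 = q := by
          have := getD_shift pre0 (q :: p :: x :: r) 0
          rw [show numbers = pre0 ++ (q :: p :: x :: r) by simpa using hnum]
          rw [show (((pre0 ++ [q]).length : Int) + 1 - 2) = ((pre0.length + 0 : Nat) : Int) by
            simp; push_cast; ring]
          simpa using this
        have hxg : PySem.List.pyGetD numbers (((pre0 ++ [q]).length : Int) + 1) 0 = x := hx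
        by_cases hqx : q > x
        · cases r with
          | nil =>
            -- curr_idx == len - 1: A true; B keeps prev = p, loop ends
            have hlen : ((numbers.length : Int) - 1) = ((pre0 ++ [q]).length : Int) + 1 := by
              simp only [hnum, List.length_append, List.length_cons, List.length_nil]; push_cast; ring
            have hfin : finalA numbers (numbers.length : Int) (((pre0 ++ [q]).length : Int) + 1) = true := by
              simp only [finalA]; rw [← hlen]; simp
            rw [hfin]
            simp [chainB, altLoop, h, hqx]
          | cons y r' =>
            have hy : PySem.List.pyGetD numbers ((((pre0 ++ [q]).length : Int) + 1) + 1) 0 = y := by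
              have := getD_shift (pre0 ++ [q]) (p :: x :: y :: r') 2
              rw [hnum]
              rw [show ((((pre0 ++ [q]).length : Int) + 1) + 1) = (((pre0 ++ [q]).length + 2 : Nat) : Int) by push_cast; ring]
              simpa using this
            have hne1 : ¬ ((((pre0 ++ [q]).length : Nat) : Int) + 1 = -1) := by push_cast; omega
            have hne2 : ¬ ((((pre0 ++ [q]).length : Nat) : Int) + 1 = 1) := by simp; push_cast; omega
            have hne3 : ¬ ((((pre0 ++ [q]).length : Nat) : Int) + 1 = (numbers.length : Int) - 1) := by
              simp only [hnum, List.length_append, List.length_cons, List.length_nil]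
              push_cast; omega
            have hfin : finalA numbers (numbers.length : Int) (((pre0 ++ [q]).length : Int) + 1)
                = decide (p ≤ y) := by
              simp only [finalA]
              rw [show (((pre0 ++ [q]).length : Int) + 1 + 1) = ((((pre0 ++ [q]).length : Nat) : Int) + 1) + 1 by push_cast; ring] at hy
              rw [hcp, hy, hq, hxg]
              simp [not_le.mpr hqx]
              intro hcase
              exfalso
              have hlen4 : (numbers.length : Int) = (pre0.length : Int) + (4 + (r'.length : Int)) := by
                simp only [hnum, List.length_append, List.length_cons, List.length_nil]; push_cast; ring
              rcases hcase with (h1 | h2) | h3 <;> omega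
            rw [hfin]
            by_cases hpy : p ≤ y
            · have hxy : x ≤ y := by omega
              simp [chainB, altLoop, h, hqx, altLoop_one, hpy, hxy]
            · simp [chainB, altLoop, h, hqx, altLoop_one, hpy]
        · -- q ≤ x: numbers[curr_idx-2] <= numbers[curr_idx], A true; B lowers prev to x
          have hfin : finalA numbers (numbers.length : Int) (((pre0 ++ [q]).length : Int) + 1) = true := by
            simp only [finalA]
            rw [hq, hxg]
            simp [not_lt.mp hqx]
          rw [hfin]
          simp [altLoop, h, hqx, altLoop_one]
    · rw [show stepA numbers (some (-1 : Int)) ((pre.length : Int) + 1) = some (-1 : Int) by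
        simp only [stepA]; rw [hx, hp]; simp [h]]
      have := ih (pre ++ [p]) x (by simp [hnum])
      rw [show (((pre ++ [p]).length : Int) + 1) = ((pre.length : Int) + 1 + 1) by
        simp [List.length_append]] at this
      rw [this]
      simp [altLoop, not_lt.mp h, List.getLast?_concat]

-- ===== VERDICT (by name: the statement is the Claim_ definition above) =====
theorem canModify_spec : Claim_equal_canModify := by
  intro numbers _
  unfold Spec_canModify
  cases numbers with
  | nil => rfl
  | cons a rest =>
    have := phase1 (a :: rest) rest [] a rfl
    simpa [canModify, canModify_alt] using this
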